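-- pv_equiv track=rewrite | github.com/novayo/LeetCode | 0544_Output_Contest_Matches/try_1.py | findContestMatch
-- ===== SOURCE A (Python) =====
-- def findContestMatch(n: int) -> str:
--     '''
--     一直依照 (先抓最大，配當前最小) 去組成string即可
--     '''
--     def getString(s1, s2):
--         return "({},{})".format(s1, s2)
--
--
--
--     # init
--     string_list = []
--     for i in range(n//2):
--         string_list.append(getString(str(i+1), str(n-i)))
--
--     # loop until string_list length = 1
--     while len(string_list) > 1:
--         length = len(string_list)
--         for i in range(length//2):
--             string_list[i] = getString(string_list[i], string_list[-1])
--             string_list.pop()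
--
--     return string_list[0]
-- ===== SOURCE B (Python) =====
-- def findContestMatch(n: int) -> str:
--     # Seed the first round, then recursively build each next round as a fresh list
--     # pairing lst[i] with lst[-1-i] (keeping the middle element of an odd round),
--     # instead of A's in-place index/pop mutation of one list.
--     def build(lst):
--         if len(lst) <= 1:
--             return lst[0]
--         m = len(lst)
--         nxt = ['({},{})'.format(lst[i], lst[m - 1 - i]) for i in range(m // 2)]
--         if m % 2 == 1:
--             nxt.append(lst[m // 2])
--         return build(nxt)
--
--     return build(['({},{})'.format(i + 1, n - i) for i in range(n // 2)])
-- ===== Notes on version B (the rewrite author's own statement) =====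
-- stated objective: alternative
-- what changed: Replaces A's in-place while/pop mutation of one list (rewriting index i and popping the tail each step) with a recursive level-by-level construction: each next round is built as a fresh list pairing lst[i] with lst[-1-i] (keeping the middle element of an odd round) and build recurses on it.
-- outside the precondition, e.g. on findContestMatch(1): A raises IndexError, B raises IndexError
import Mathlib
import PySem

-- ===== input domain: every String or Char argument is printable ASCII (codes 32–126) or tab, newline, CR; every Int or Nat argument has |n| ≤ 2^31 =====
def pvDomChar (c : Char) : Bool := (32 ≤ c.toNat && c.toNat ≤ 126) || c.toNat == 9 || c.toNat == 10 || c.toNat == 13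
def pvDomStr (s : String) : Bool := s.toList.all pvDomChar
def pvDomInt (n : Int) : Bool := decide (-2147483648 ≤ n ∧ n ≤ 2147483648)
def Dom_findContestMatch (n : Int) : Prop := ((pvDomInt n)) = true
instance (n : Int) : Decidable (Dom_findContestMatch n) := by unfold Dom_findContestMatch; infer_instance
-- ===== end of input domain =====

-- B replaces A's in-place while/pop fold with a recursive level builder that peels
-- (first,last) pairs and recurses on the interior (objective: alternative decomposition).


-- ===== PORT A =====
-- "({},{})".format(s1, s2)
def getStringAB (s1 s2 : String) : String := "(" ++ s1 ++ "," ++ s2 ++ ")"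

-- one iteration of A's inner for-loop body: string_list[i] = getString(string_list[i], string_list[-1]); string_list.pop()
def roundStepA (st : List String) (i : Nat) : List String :=
  (st.set i (getStringAB (st.getD i "") (st.getLastD ""))).dropLast

-- A's 'while len(string_list) > 1' loop. The Nat argument is a fuel bound making the
-- recursion structural (each round strictly shrinks the list, so fuel = initial length
-- is always enough); 'string_list[0]' on the empty list raises IndexError in Python
-- (excluded by Pre_), ported as headD "".
def loopA : Nat → List String → String
  | 0, lst => lst.headD ""
  | fuel + 1, lst =>
      if 1 < lst.length then
        loopA fuel (List.foldl roundStepA lst (List.range (lst.length / 2)))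
      else
        lst.headD ""

def findContestMatch (n : Int) : String :=
  let seeds := List.foldl
    (fun acc i => acc ++ [getStringAB (PySem.Int.toStr (i + 1)) (PySem.Int.toStr (n - i))])
    [] (PySem.List.pyRange 0 (PySem.Int.floordiv n 2) 1)
  loopA seeds.length seeds

-- ===== PORT B =====
-- Source B's next-level comprehension: pair lst[i] with lst[m-1-i], keep the middle of an odd round
def halfB (lst : List String) : List String :=
  (List.range (lst.length / 2)).map
    (fun i => getStringAB (lst.getD i "") (lst.getD (lst.length - 1 - i) ""))
  ++ (if lst.length % 2 = 1 then [lst.getD (lst.length / 2) ""] else [])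

-- Source B's build; 'lst[0]' on [] raises IndexError in Python (excluded by Pre_), ported as
-- headD ""; fuel (= initial length) makes the recursion structural.
def buildB : Nat → List String → String
  | 0, lst => lst.headD ""
  | fuel + 1, lst =>
      if lst.length ≤ 1 then lst.headD ""
      else buildB fuel (halfB lst)

def findContestMatch_alt (n : Int) : String :=
  let seeds := (PySem.List.pyRange 0 (PySem.Int.floordiv n 2) 1).map
    (fun i => getStringAB (PySem.Int.toStr (i + 1)) (PySem.Int.toStr (n - i)))
  buildB seeds.length seeds

-- ===== PRECONDITION & SPEC =====
-- Pre_ excludes n ≤ 1 (and all negative n), on which A's string_list is empty and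
-- 'string_list[0]' raises IndexError; B raises the same IndexError there.
def Pre_findContestMatch (n : Int) : Prop := 2 ≤ n
instance (n : Int) : Decidable (Pre_findContestMatch n) := by unfold Pre_findContestMatch; infer_instance
def pvWitness_findContestMatch : Int := (6)

def Spec_findContestMatch (n : Int) (out : String) : Prop := out = findContestMatch_alt n
instance (n : Int) (out : String) : Decidable (Spec_findContestMatch n out) := by unfold Spec_findContestMatch; infer_instance

-- ===== CLAIM (what is proved, stated in full; the proofs are below) =====
def Claim_equal_findContestMatch : Prop := ∀ (n : Int), Dom_findContestMatch n → Pre_findContestMatch n → Spec_findContestMatch n (findContestMatch n)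

-- ===== LEMMAS AND PROOFS =====

-- proof-side helper: the peel form of one round (pair head with last, recurse on the interior);
-- the fuel argument makes it structural
def halfP : Nat → List String → List String
  | 0, lst => lst
  | fuel + 1, lst =>
      match lst with
      | x :: y :: r => getStringAB x ((y :: r).getLastD "") :: halfP fuel (y :: r).dropLast
      | _ => lst

-- fuel does not matter once it covers the list length
theorem halfP_fuel (f1 : Nat) : ∀ (f2 : Nat) (lst : List String),
    lst.length ≤ f1 → lst.length ≤ f2 → halfP f1 lst = halfP f2 lst := by
  induction f1 with
  | zero =>
      intro f2 lst h1 _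
      rw [List.length_eq_zero_iff.mp (Nat.le_zero.mp h1)]
      cases f2 <;> rfl
  | succ f1 ih =>
      intro f2 lst h1 h2
      match f2, lst with
      | 0, lst =>
          rw [List.length_eq_zero_iff.mp (Nat.le_zero.mp h2)]
          rfl
      | f2 + 1, [] => rfl
      | f2 + 1, [x] => rfl
      | f2 + 1, x :: y :: r =>
          simp only [halfP]
          rw [ih f2 (y :: r).dropLast (by simp at h1 ⊢; omega) (by simp at h2 ⊢; omega)]

-- list surgery helpers for one roundStepA at index done.length
theorem getD_append_len (done t : List String) (x : String) (d : String) :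
    (done ++ x :: t).getD done.length d = x := by
  induction done with
  | nil => simp [List.getD]
  | cons a l _ => simp [List.getD]

theorem set_append_len (done t : List String) (x v : String) :
    (done ++ x :: t).set done.length v = done ++ v :: t := by
  induction done with
  | nil => simp
  | cons a l ih => simp [ih]

theorem getLastD_irrel (t : List String) : ∀ (x d d' : String),
    (x :: t).getLastD d = (x :: t).getLastD d' := by
  induction t with
  | nil => intro x d d'; rfl
  | cons y t ih => intro x d d'; simp only [List.getLastD_cons]

theorem getLastD_append_cons (done : List String) (x : String) (t : List String) :
    ∀ d, (done ++ x :: t).getLastD d = (x :: t).getLastD d := by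
  induction done with
  | nil => intro d; rfl
  | cons a l ih =>
      intro d
      rw [List.cons_append, List.getLastD_cons]
      cases l with
      | nil => exact getLastD_irrel t x a d
      | cons b l' => rw [List.cons_append] at ih ⊢; rw [ih a]; exact getLastD_irrel t x a d

-- A's inner for-loop, started at offset done.length, performs exactly B's halfB on the suffix
theorem foldl_round_eq (rest : List String) : ∀ done : List String,
    List.foldl roundStepA (done ++ rest) (List.range' done.length (rest.length / 2))
      = done ++ halfP rest.length rest := by
  match rest with
  | [] => intro done; simp [halfP]
  | [x] => intro done; simp [halfP]
  | x :: y :: r =>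
      intro done
      have hlen : (x :: y :: r).length / 2 = r.length / 2 + 1 := by simp; omega
      rw [hlen, List.range'_succ, List.foldl_cons]
      have hstep : roundStepA (done ++ x :: y :: r) done.length
          = (done ++ [getStringAB x ((y :: r).getLastD "")]) ++ (y :: r).dropLast := by
        unfold roundStepA
        rw [getD_append_len, getLastD_append_cons, List.getLastD_cons,
          getLastD_irrel r y x "", set_append_len,
          List.dropLast_append_of_ne_nil (by simp), List.dropLast_cons₂]
        simp
      rw [hstep]
      have ih := foldl_round_eq (y :: r).dropLast (done ++ [getStringAB x ((y :: r).getLastD "")])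
      have hl : (y :: r).dropLast.length / 2 = r.length / 2 := by simp
      have hd : (done ++ [getStringAB x ((y :: r).getLastD "")]).length = done.length + 1 := by simp
      rw [hl, hd] at ih
      rw [ih]
      have hr : halfP (x :: y :: r).length (x :: y :: r)
          = getStringAB x ((y :: r).getLastD "") :: halfP (r.length + 1) (y :: r).dropLast := by
        simp only [List.length_cons, halfP]
      rw [hr, halfP_fuel (r.length + 1) (y :: r).dropLast.length (y :: r).dropLast
        (by simp) (le_refl _)]
      simp
termination_by rest.length
decreasing_by simp

-- getD at the last index is getLastD
theorem getD_last (t : List String) (d : String) :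
    t.getD (t.length - 1) d = t.getLastD d := by
  rw [List.getD_eq_getElem?_getD, ← List.getLast?_eq_getElem?, List.getLastD_eq_getLast?]

-- length of one comprehension round
theorem halfB_len (lst : List String) :
    (halfB lst).length = lst.length - lst.length / 2 := by
  simp only [halfB, List.length_append, List.length_map, List.length_range]
  split <;> simp <;> omega

-- the peel form computes exactly the comprehension round
theorem peel_eq_comp (lst : List String) : halfP lst.length lst = halfB lst := by
  match lst with
  | [] => simp [halfP, halfB]
  | [x] => simp [halfP, halfB]
  | x :: y :: r =>
      have hrec := peel_eq_comp (y :: r).dropLast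
      have ht : (y :: r).dropLast.length = r.length := by simp
      have hstep : halfP (x :: y :: r).length (x :: y :: r)
          = getStringAB x ((y :: r).getLastD "") :: halfP (r.length + 1) (y :: r).dropLast := by
        simp only [List.length_cons]
        rfl
      rw [hstep, halfP_fuel (r.length + 1) (y :: r).dropLast.length (y :: r).dropLast (by simp)
        (le_refl _), hrec]
      -- now compare the two comprehension forms index by index
      unfold halfB
      rw [ht]
      have hL2 : (x :: y :: r).length / 2 = r.length / 2 + 1 := by simp; omega
      have hLm : (x :: y :: r).length % 2 = r.length % 2 := by simp; omega
      rw [hL2, hLm, List.range_succ_eq_map, List.map_cons, List.map_map]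
      have h0 : getStringAB ((x :: y :: r).getD 0 "")
          ((x :: y :: r).getD ((x :: y :: r).length - 1 - 0) "")
          = getStringAB x ((y :: r).getLastD "") := by
        have : (x :: y :: r).length - 1 - 0 = r.length + 1 := by simp
        rw [this]
        have : (x :: y :: r).getD (r.length + 1) "" = (y :: r).getD r.length "" := by
          simp only [List.getD_eq_getElem?_getD, List.getElem?_cons_succ]
        rw [List.getD_cons_zero, this]
        have := getD_last (y :: r) ""
        simp only [List.length_cons, Nat.add_sub_cancel] at this
        rw [this]
      have htail : (List.range (r.length / 2)).map
            ((fun i => getStringAB ((x :: y :: r).getD i "")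
              (((x :: y :: r)).getD ((x :: y :: r).length - 1 - i) "")) ∘ Nat.succ)
          = (List.range (r.length / 2)).map
            (fun i => getStringAB ((y :: r).dropLast.getD i "")
              ((y :: r).dropLast.getD ((y :: r).dropLast.length - 1 - i) "")) := by
        apply List.map_congr_left
        intro i hi
        rw [List.mem_range] at hi
        have hi1 : i < r.length := by omega
        have e1 : (x :: y :: r).getD (Nat.succ i) "" = (y :: r).dropLast.getD i "" := by
          rw [List.getD_eq_getElem?_getD, List.getD_eq_getElem?_getD, List.getElem?_dropLast,
            if_pos (by simp; omega), List.getElem?_cons_succ]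
        have e2 : (x :: y :: r).getD ((x :: y :: r).length - 1 - Nat.succ i) ""
            = (y :: r).dropLast.getD ((y :: r).dropLast.length - 1 - i) "" := by
          have hx : (x :: y :: r).length - 1 - Nat.succ i = r.length - i := by simp
          have hy : (y :: r).dropLast.length - 1 - i = r.length - 1 - i := by simp
          rw [hx, hy, List.getD_eq_getElem?_getD, List.getD_eq_getElem?_getD,
            List.getElem?_dropLast, if_pos (by simp; omega)]
          have hidx : r.length - i = (r.length - 1 - i) + 1 := by omega
          rw [hidx, List.getElem?_cons_succ]
        rw [Function.comp_apply, e1, e2]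
      have hmid : (if r.length % 2 = 1 then [(x :: y :: r).getD (r.length / 2 + 1) ""] else [])
          = (if r.length % 2 = 1 then [(y :: r).dropLast.getD (r.length / 2) ""] else []) := by
        by_cases hp : r.length % 2 = 1
        · rw [if_pos hp, if_pos hp]
          have hr1 : 1 ≤ r.length := by omega
          rw [List.getD_eq_getElem?_getD, List.getD_eq_getElem?_getD, List.getElem?_dropLast,
            if_pos (by simp; omega), List.getElem?_cons_succ]
        · rw [if_neg hp, if_neg hp]
      rw [h0, htail, hmid]
      simp
termination_by lst.length
decreasing_by simp

-- with adequate fuel the two main loops agree on every list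
theorem loopA_eq_buildB (f : Nat) : ∀ lst : List String, lst.length ≤ f →
    loopA f lst = buildB f lst := by
  induction f with
  | zero => intro lst _; rfl
  | succ f ih =>
      intro lst h
      by_cases h1 : 1 < lst.length
      · simp only [loopA, buildB, if_pos h1, if_neg (by omega : ¬ lst.length ≤ 1)]
        have key := foldl_round_eq lst []
        simp only [List.nil_append, List.length_nil] at key
        rw [List.range_eq_range', key, peel_eq_comp]
        exact ih (halfB lst)
          (by rw [halfB_len]; omega)
      · simp only [loopA, buildB, if_neg h1, if_pos (by omega : lst.length ≤ 1)]

-- A's seeding loop (append fold) builds exactly B's seeding comprehension (map)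
theorem seeds_eq (l : List Int) (f : Int → String) (acc : List String) :
    List.foldl (fun acc i => acc ++ [f i]) acc l = acc ++ l.map f := by
  induction l generalizing acc with
  | nil => simp
  | cons i l ih => simp [ih]

-- ===== VERDICT (by name: the statement is the Claim_ definition above) =====
theorem findContestMatch_spec : Claim_equal_findContestMatch := by
  intro n _ _
  unfold Spec_findContestMatch findContestMatch findContestMatch_alt
  rw [seeds_eq, List.nil_append]
  exact loopA_eq_buildB _ _ (le_refl _)
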